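-- pv_equiv track=rewrite | github.com/shakirshakeelzargar/google-foobar | level 3/queue-to-do/my-solution.py | solution
-- ===== SOURCE A (Python) =====
-- def solution(start,length):
--
--
--     final_list=[]
--     ls=[[(start+x)+(j*length) for x in range(length)] for j in range(length)]
--     if len(ls)==0 :
--         return 0
--     else:
--         j=0
--         for n in range(len(ls)):
--             tmp=ls[n][:len(ls[n])-j]
--             final_list=final_list+tmp
--             j+=1
--         ret_val=get_xor(final_list)
--         return ret_val
--
-- def get_xor(ls):
--     if len(ls)==1:
--         return ls[0]
--     ans=0
--     for x in ls:
--         ans=ans^x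
--     return ans
-- ===== SOURCE B (Python) =====
-- def _xor0(n):
--     # XOR of 0..n inclusive, for n >= 0 (closed form by n % 4)
--     r = n % 4
--     if r == 0:
--         return n
--     if r == 1:
--         return 1
--     if r == 2:
--         return n + 1
--     return 0
--
--
-- def _range_xor(a, b):
--     # XOR of all integers in range(a, b), any signs, O(1)
--     if a >= b:
--         return 0
--     if a >= 0:
--         return _xor0(b - 1) ^ (_xor0(a - 1) if a > 0 else 0)
--     m = min(b, 0)
--     x = _xor0(-a - 1) ^ (_xor0(-m - 1) if -m > 0 else 0)
--     res = x ^ (-1 if (m - a) % 2 == 1 else 0)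
--     if b > 0:
--         res = res ^ _xor0(b - 1)
--     return res
--
--
-- def solution(start, length):
--     if length <= 0:
--         return 0
--     ans = 0
--     for j in range(length):
--         a = start + j * length
--         ans ^= _range_xor(a, a + length - j)
--     return ans
-- ===== Notes on version B (the rewrite author's own statement) =====
-- stated objective: faster
-- what changed: Instead of materialising the whole triangular slice of the grid and XOR-folding its O(length^2) cells, B XORs each row's consecutive-integer segment in O(1) via the prefix-XOR-of-0..n closed form (n mod 4), extended to negative ranges by two's-complement parity, giving O(length) total.
import Mathlib
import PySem

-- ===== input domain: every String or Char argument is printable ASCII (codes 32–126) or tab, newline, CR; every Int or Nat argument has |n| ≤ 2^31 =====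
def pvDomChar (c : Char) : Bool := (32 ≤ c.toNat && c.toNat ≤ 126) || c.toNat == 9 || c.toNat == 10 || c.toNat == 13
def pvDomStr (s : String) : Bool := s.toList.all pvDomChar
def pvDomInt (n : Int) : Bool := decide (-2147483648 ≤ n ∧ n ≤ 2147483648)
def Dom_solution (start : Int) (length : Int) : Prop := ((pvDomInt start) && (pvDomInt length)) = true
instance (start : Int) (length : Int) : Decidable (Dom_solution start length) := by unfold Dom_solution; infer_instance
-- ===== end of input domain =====

-- B replaces A's quadratic build-all-cells-then-XOR with a per-row O(1) closed form
-- (prefix-XOR of 0..n by n mod 4, extended to negative ranges by complement), O(length) total.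

-- ===== PORT A =====
-- get_xor: ls[0] is guarded by len(ls)==1, so pyGetD with default 0 is exact there.
def get_xor (ls : List Int) : Int :=
  if ls.length = 1 then PySem.List.pyGetD ls 0 0
  else ls.foldl (fun ans x => PySem.Int.bxor ans x) 0

def solution (start : Int) (length : Int) : Int :=
  let ls : List (List Int) :=
    (PySem.List.pyRange 0 length 1).map (fun j =>
      (PySem.List.pyRange 0 length 1).map (fun x => (start + x) + j * length))
  if ls.length = 0 then 0
  else
    -- state: (final_list, j); ls[n] is in range so pyGetD with default [] is exact.
    let fl := ((PySem.List.pyRange 0 (ls.length : Int) 1).foldl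
      (fun (st : List Int × Int) n =>
        let row := PySem.List.pyGetD ls n []
        let tmp := PySem.List.slice row none (some ((row.length : Int) - st.2))
        (st.1 ++ tmp, st.2 + 1)) ([], 0)).1
    get_xor fl

-- ===== PORT B =====
def xor0 (n : Int) : Int :=
  let r := PySem.Int.mod n 4
  if r = 0 then n else if r = 1 then 1 else if r = 2 then n + 1 else 0

def rangeXor (a b : Int) : Int :=
  if a ≥ b then 0
  else if a ≥ 0 then PySem.Int.bxor (xor0 (b - 1)) (if a > 0 then xor0 (a - 1) else 0)
  else
    let m := min b 0
    let x := PySem.Int.bxor (xor0 (-a - 1)) (if -m > 0 then xor0 (-m - 1) else 0)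
    let res := PySem.Int.bxor x (if PySem.Int.mod (m - a) 2 = 1 then -1 else 0)
    if b > 0 then PySem.Int.bxor res (xor0 (b - 1)) else res

def solution_alt (start : Int) (length : Int) : Int :=
  if length ≤ 0 then 0
  else (PySem.List.pyRange 0 length 1).foldl
    (fun ans j =>
      let a := start + j * length
      PySem.Int.bxor ans (rangeXor a (a + length - j))) 0

-- ===== PRECONDITION & SPEC =====
def Spec_solution (start : Int) (length : Int) (out : Int) : Prop := out = solution_alt start length
instance (start : Int) (length : Int) (out : Int) : Decidable (Spec_solution start length out) := by unfold Spec_solution; infer_instance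

-- ===== CLAIM (what is proved, stated in full; the proofs are below) =====
def Claim_equal_solution : Prop := ∀ (start : Int) (length : Int), Dom_solution start length → Spec_solution start length (solution start length)

-- ===== LEMMAS AND PROOFS =====

-- XOR of a list, the common denominator of both ports
def xorList (l : List Int) : Int := l.foldl PySem.Int.bxor 0

-- encode an Int as (sign bit, magnitude bits): bxor is componentwise xor in this encoding
def encInt (a : Int) : Bool × Nat := if 0 ≤ a then (false, a.toNat) else (true, (-a - 1).toNat)
def decInt (p : Bool × Nat) : Int := if p.1 then -(p.2 : Int) - 1 else (p.2 : Int)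

theorem bxor_enc (a b : Int) : PySem.Int.bxor a b =
    decInt (xor (encInt a).1 (encInt b).1, (encInt a).2 ^^^ (encInt b).2) := by
  simp only [PySem.Int.bxor, encInt]
  split_ifs with h1 h2 h2 <;> simp [decInt]

theorem enc_dec (p : Bool × Nat) : encInt (decInt p) = p := by
  obtain ⟨s, n⟩ := p
  cases s <;> simp [encInt, decInt]
  omega

theorem bxor_assoc (a b c : Int) :
    PySem.Int.bxor (PySem.Int.bxor a b) c = PySem.Int.bxor a (PySem.Int.bxor b c) := by
  rw [bxor_enc a b, bxor_enc b c, bxor_enc (decInt _) c, bxor_enc a (decInt _)]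
  rw [enc_dec, enc_dec]
  simp [Nat.xor_assoc]

theorem bxor_zero_left (a : Int) : PySem.Int.bxor 0 a = a := by
  rw [PySem.Int.bxor_comm]; exact PySem.Int.bxor_zero a

theorem bxor_left_comm (a b c : Int) :
    PySem.Int.bxor a (PySem.Int.bxor b c) = PySem.Int.bxor b (PySem.Int.bxor a c) := by
  rw [← bxor_assoc, PySem.Int.bxor_comm a b, bxor_assoc]

theorem bxor_cancel_left (a b : Int) : PySem.Int.bxor a (PySem.Int.bxor a b) = b := by
  rw [← bxor_assoc, PySem.Int.bxor_self, bxor_zero_left]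

theorem bxor_neg_one (u : Int) : PySem.Int.bxor u (-1) = -u - 1 := by
  simp only [PySem.Int.bxor]
  split_ifs <;> simp <;> omega

theorem foldl_bxor (l : List Int) (i : Int) :
    l.foldl PySem.Int.bxor i = PySem.Int.bxor i (xorList l) := by
  induction l generalizing i with
  | nil => simp [xorList]
  | cons x t ih =>
    have hc : xorList (x :: t) = PySem.Int.bxor x (xorList t) := by
      simp only [xorList, List.foldl_cons, bxor_zero_left]; exact ih x
    rw [List.foldl_cons, ih (PySem.Int.bxor i x), hc, bxor_assoc]

theorem xorList_cons (x : Int) (l : List Int) :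
    xorList (x :: l) = PySem.Int.bxor x (xorList l) := by
  simp only [xorList, List.foldl_cons, bxor_zero_left]
  exact foldl_bxor l x

theorem xorList_append (l1 l2 : List Int) :
    xorList (l1 ++ l2) = PySem.Int.bxor (xorList l1) (xorList l2) := by
  simp only [xorList, List.foldl_append]
  exact foldl_bxor l2 (l1.foldl PySem.Int.bxor 0)

theorem xorList_reverse (l : List Int) : xorList l.reverse = xorList l := by
  induction l with
  | nil => rfl
  | cons x t ih =>
    simp only [List.reverse_cons, xorList_append, xorList_cons, ih]
    simp [xorList, PySem.Int.bxor_comm]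

-- Nat facts behind the mod-4 prefix-XOR closed form
theorem nat_xor_A (q : Nat) : (4 * q) ^^^ (4 * q + 1) = 1 := by
  apply Nat.eq_of_testBit_eq
  intro i
  rw [Nat.testBit_xor]
  cases i with
  | zero =>
    have h2 : (4 * q) % 2 = 0 := by omega
    have h3 : (4 * q + 1) % 2 = 1 := by omega
    simp [Nat.testBit_zero, h2, h3]
  | succ i =>
    rw [Nat.testBit_succ, Nat.testBit_succ, Nat.testBit_succ,
      show 4 * q / 2 = 2 * q by omega, show (4 * q + 1) / 2 = 2 * q by omega,
      show (1 : Nat) / 2 = 0 by omega]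
    simp

theorem nat_xor_B (q : Nat) : (4 * q + 2) ^^^ 1 = 4 * q + 3 := by
  apply Nat.eq_of_testBit_eq
  intro i
  rw [Nat.testBit_xor]
  cases i with
  | zero =>
    have h2 : (4 * q + 2) % 2 = 0 := by omega
    have h3 : (4 * q + 3) % 2 = 1 := by omega
    simp [Nat.testBit_zero, h2, h3]
  | succ i =>
    rw [Nat.testBit_succ, Nat.testBit_succ, Nat.testBit_succ,
      show (4 * q + 2) / 2 = 2 * q + 1 by omega, show (4 * q + 3) / 2 = 2 * q + 1 by omega,
      show (1 : Nat) / 2 = 0 by omega]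
    simp

theorem xor0_natCast (n : Nat) : xor0 (n : Int) =
    (if n % 4 = 0 then (n : Int) else if n % 4 = 1 then 1 else if n % 4 = 2 then (n : Int) + 1 else 0) := by
  simp only [xor0]
  rw [show ((4 : Int)) = ((4 : Nat) : Int) by norm_num, PySem.Int.mod_natCast]
  norm_cast

theorem xorUpto_succ (n : Nat) : xorList (PySem.List.pyRange 0 ((n : Int) + 1) 1) = xor0 (n : Int) := by
  induction n with
  | zero => decide
  | succ n ih =>
    rw [show ((n + 1 : Nat) : Int) + 1 = (((n : Int) + 1) + 1) by push_cast; ring,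
      PySem.List.pyRange_one_succ_right (by omega : (0 : Int) ≤ (n : Int) + 1),
      xorList_append, ih]
    have hx : xorList [((n : Int) + 1)] = ((n : Int) + 1) := by
      simp [xorList, bxor_zero_left]
    rw [hx, xor0_natCast, show ((n : Int) + 1) = ((n + 1 : Nat) : Int) by push_cast; ring,
      xor0_natCast]
    have h4 : n % 4 = 0 ∨ n % 4 = 1 ∨ n % 4 = 2 ∨ n % 4 = 3 := by omega
    rcases h4 with h | h | h | h
    · obtain ⟨q, hq⟩ : ∃ q, n = 4 * q := ⟨n / 4, by omega⟩
      subst hq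
      rw [if_pos h, if_pos (by omega : (4 * q + 1) % 4 = 1)]
      rw [if_neg (by omega : ¬ (4 * q + 1) % 4 = 0)] 
      rw [PySem.Int.bxor_natCast, nat_xor_A]
      rfl
    · obtain ⟨q, hq⟩ : ∃ q, n = 4 * q + 1 := ⟨n / 4, by omega⟩
      subst hq
      rw [if_neg (by omega : ¬ (4 * q + 1) % 4 = 0), if_pos h,
        if_neg (by omega : ¬ (4 * q + 1 + 1) % 4 = 0),
        if_neg (by omega : ¬ (4 * q + 1 + 1) % 4 = 1),
        if_pos (by omega : (4 * q + 1 + 1) % 4 = 2)]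
      rw [PySem.Int.bxor_comm, show (1 : Int) = ((1 : Nat) : Int) from rfl,
        PySem.Int.bxor_natCast, show 4 * q + 1 + 1 = 4 * q + 2 from rfl, nat_xor_B]
      push_cast; ring
    · obtain ⟨q, hq⟩ : ∃ q, n = 4 * q + 2 := ⟨n / 4, by omega⟩
      subst hq
      rw [if_neg (by omega : ¬ (4 * q + 2) % 4 = 0),
        if_neg (by omega : ¬ (4 * q + 2) % 4 = 1), if_pos h,
        if_neg (by omega : ¬ (4 * q + 2 + 1) % 4 = 0),
        if_neg (by omega : ¬ (4 * q + 2 + 1) % 4 = 1),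
        if_neg (by omega : ¬ (4 * q + 2 + 1) % 4 = 2)]
      rw [PySem.Int.bxor_self]
    · obtain ⟨q, hq⟩ : ∃ q, n = 4 * q + 3 := ⟨n / 4, by omega⟩
      subst hq
      rw [if_neg (by omega : ¬ (4 * q + 3) % 4 = 0),
        if_neg (by omega : ¬ (4 * q + 3) % 4 = 1),
        if_neg (by omega : ¬ (4 * q + 3) % 4 = 2),
        if_pos (by omega : (4 * q + 3 + 1) % 4 = 0), bxor_zero_left]

-- XOR of range(0, t) for 0 ≤ t, in B's closed form
theorem xorUpto_eq (t : Int) (ht : 0 ≤ t) :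
    xorList (PySem.List.pyRange 0 t 1) = (if 0 < t then xor0 (t - 1) else 0) := by
  rcases Int.lt_or_le 0 t with h | h
  · obtain ⟨n, hn⟩ : ∃ n : Nat, t = (n : Int) + 1 := ⟨(t - 1).toNat, by omega⟩
    rw [hn, xorUpto_succ]
    simp [show (0:Int) < (n:Int) + 1 by omega, show (n:Int) + 1 - 1 = (n:Int) by ring]
  · rw [PySem.List.pyRange_one_eq_nil (by omega)]
    simp [xorList, show ¬ (0:Int) < t by omega]

theorem xor_seg (a b : Int) (ha : 0 ≤ a) (hab : a ≤ b) :
    xorList (PySem.List.pyRange a b 1) =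
      PySem.Int.bxor (xorList (PySem.List.pyRange 0 a 1)) (xorList (PySem.List.pyRange 0 b 1)) := by
  have h := PySem.List.pyRange_one_append 0 a b ha hab
  rw [h, xorList_append, bxor_cancel_left]

-- parity-complement: XOR of the bitwise complements of a list
theorem xorList_map_compl (l : List Int) :
    xorList (l.map (fun u => PySem.Int.bxor u (-1))) =
      PySem.Int.bxor (xorList l) (if l.length % 2 = 1 then -1 else 0) := by
  induction l with
  | nil => simp [xorList]
  | cons x t ih =>
    simp only [List.map_cons, xorList_cons, ih, List.length_cons]
    rcases Nat.mod_two_eq_zero_or_one t.length with h | h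
    · rw [if_neg (by omega : ¬ t.length % 2 = 1), if_pos (by omega : (t.length + 1) % 2 = 1),
        PySem.Int.bxor_zero]
      simp [bxor_left_comm, PySem.Int.bxor_comm]
    · rw [if_pos (by omega : t.length % 2 = 1), if_neg (by omega : ¬ (t.length + 1) % 2 = 1),
        PySem.Int.bxor_zero]
      simp [bxor_left_comm, PySem.Int.bxor_comm, PySem.Int.bxor_self, PySem.Int.bxor_zero]

-- range(a, m) of negatives is the reversed complement of range(-m, -a)
theorem pyRange_neg_compl (n : Nat) : ∀ a m : Int, (m - a).toNat = n →
    (PySem.List.pyRange a m 1).map (fun u => PySem.Int.bxor u (-1)) =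
      (PySem.List.pyRange (-m) (-a) 1).reverse := by
  induction n with
  | zero =>
    intro a m h
    rw [PySem.List.pyRange_one_eq_nil (by omega), PySem.List.pyRange_one_eq_nil (by omega)]
    rfl
  | succ n ih =>
    intro a m h
    rw [PySem.List.pyRange_one_cons (by omega : a < m), List.map_cons,
      show (-a : Int) = (-a - 1) + 1 by ring,
      PySem.List.pyRange_one_succ_right (by omega : (-m : Int) ≤ -a - 1),
      List.reverse_append, bxor_neg_one]
    simp only [List.reverse_cons, List.reverse_nil, List.nil_append, List.cons_append]
    rw [ih (a + 1) m (by omega), show (-(a + 1) : Int) = -a - 1 by ring]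

theorem rangeXor_correct (a b : Int) : rangeXor a b = xorList (PySem.List.pyRange a b 1) := by
  rcases Int.lt_or_le a b with hab | hab
  swap
  · rw [rangeXor, if_pos (by omega : a ≥ b), PySem.List.pyRange_one_eq_nil (by omega)]; rfl
  rcases Int.lt_or_le a 0 with ha | ha
  swap
  · -- 0 ≤ a < b
    rw [rangeXor, if_neg (by omega : ¬ a ≥ b), if_pos (by omega : a ≥ 0)]
    rw [xor_seg a b ha (by omega), xorUpto_eq a ha, xorUpto_eq b (by omega),
      if_pos (by omega : (0:Int) < b), PySem.Int.bxor_comm]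
  -- a < 0
  have hneg : ∀ m : Int, a ≤ m → m ≤ 0 → xorList (PySem.List.pyRange a m 1) =
      PySem.Int.bxor (xorList (PySem.List.pyRange (-m) (-a) 1))
        (if (m - a).toNat % 2 = 1 then -1 else 0) := by
    intro m ham hm0
    have h1 := pyRange_neg_compl (m - a).toNat a m rfl
    have h3 := xorList_map_compl (PySem.List.pyRange a m 1)
    rw [h1, xorList_reverse, PySem.List.length_pyRange_one] at h3
    rcases Nat.mod_two_eq_zero_or_one (m - a).toNat with hp | hp
    · simp only [hp, if_neg (by omega : ¬ (0:Nat) = 1), PySem.Int.bxor_zero] at h3 ⊢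
      exact h3.symm
    · simp only [hp] at h3 ⊢
      rw [h3, bxor_assoc, PySem.Int.bxor_self, PySem.Int.bxor_zero]
  have hseg : ∀ m : Int, m ≤ 0 → a ≤ m → xorList (PySem.List.pyRange (-m) (-a) 1) =
      PySem.Int.bxor (xor0 (-a - 1)) (if -m > 0 then xor0 (-m - 1) else 0) := by
    intro m hm0 ham
    rw [xor_seg (-m) (-a) (by omega) (by omega), xorUpto_eq (-m) (by omega),
      xorUpto_eq (-a) (by omega), if_pos (by omega : (0:Int) < -a), PySem.Int.bxor_comm]
  have hpar : ∀ m : Int, a ≤ m → (if PySem.Int.mod (m - a) 2 = 1 then (-1 : Int) else 0) =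
      (if (m - a).toNat % 2 = 1 then (-1 : Int) else 0) := by
    intro m ham
    rw [PySem.Int.mod_eq_emod_of_pos (by omega : (0:Int) < 2)]
    have hcast : (m - a) % 2 = (((m - a).toNat % 2 : Nat) : Int) := by omega
    rw [hcast]
    split_ifs <;> omega
  rw [rangeXor, if_neg (by omega : ¬ a ≥ b), if_neg (by omega : ¬ a ≥ 0)]
  rcases Int.lt_or_le 0 b with hb | hb
  · -- b > 0 : min b 0 = 0, positive tail present
    rw [show min b 0 = 0 from min_eq_right (by omega), if_pos (by omega : b > 0)]
    rw [PySem.List.pyRange_one_append a 0 b (by omega) (by omega), xorList_append,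
      hneg 0 (by omega) (by omega), hseg 0 (by omega) (by omega),
      hpar 0 (by omega), xorUpto_eq b (by omega), if_pos hb,
      show (0:Int) - a = -a from by ring]
  · -- b ≤ 0 : min b 0 = b, positive part empty
    rw [show min b 0 = b from min_eq_left hb, if_neg (by omega : ¬ b > 0)]
    rw [hneg b (by omega) hb, hseg b hb (by omega), hpar b (by omega)]

theorem get_xor_eq (l : List Int) : get_xor l = xorList l := by
  rw [get_xor]
  split_ifs with h
  · match l, h with
    | [x], _ => simp [PySem.List.pyGetD, PySem.List.pyGet?, PySem.List.pyIdx?, xorList, bxor_zero_left]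
  · rfl

-- the pair-state fold of A: the counter component equals the current range element
theorem pairfold (F : (List Int × Int) → Int → List Int) :
    ∀ (n : Nat) (c : Int) (acc : List Int),
    (((PySem.List.pyRange c (c + n) 1).foldl
        (fun (st : List Int × Int) x => (F st x, st.2 + 1)) (acc, c)).1) =
      (PySem.List.pyRange c (c + n) 1).foldl (fun a x => F (a, x) x) acc := by
  intro n
  induction n with
  | zero => intro c acc; rw [PySem.List.pyRange_one_eq_nil (by omega)]; rfl
  | succ n ih =>
    intro c acc
    rw [show ((n + 1 : Nat) : Int) = (n : Int) + 1 by omega,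
      PySem.List.pyRange_one_cons (by omega : c < c + ((n : Int) + 1))]
    simp only [List.foldl_cons]
    have h1 : c + ((n : Int) + 1) = (c + 1) + (n : Int) := by push_cast; ring
    rw [h1]
    exact ih (c + 1) (F (acc, c) c)

-- the accumulated-concatenation fold XORs to a fold of segment-XORs
theorem foldl_concat_xor (g : Int → List Int) (l : List Int) (init : List Int) :
    xorList (l.foldl (fun acc n => acc ++ g n) init) =
      l.foldl (fun ans n => PySem.Int.bxor ans (xorList (g n))) (xorList init) := by
  induction l generalizing init with
  | nil => rfl
  | cons x t ih => simp only [List.foldl_cons, ih, xorList_append]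

theorem take_pyRange_zero (L : Int) (k : Nat) (hk : (k : Int) ≤ L) :
    (PySem.List.pyRange 0 L 1).take k = PySem.List.pyRange 0 (k : Int) 1 := by
  rw [PySem.List.pyRange_one 0 L, PySem.List.pyRange_one 0 (k : Int), ← List.map_take,
    List.take_range, show min k (L - 0).toNat = ((k : Int) - 0).toNat by omega]

-- ===== VERDICT (by name: the statement is the Claim_ definition above) =====
theorem solution_spec : Claim_equal_solution := by
  intro start length _
  unfold Spec_solution solution solution_alt
  rcases Int.lt_or_le 0 length with hL | hL
  swap
  · rw [PySem.List.pyRange_one_eq_nil (by omega)]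
    simp [show length ≤ 0 from by omega]
  rw [if_neg (by omega : ¬ length ≤ 0)]
  have hlen : ((PySem.List.pyRange 0 length 1).map (fun j =>
      (PySem.List.pyRange 0 length 1).map (fun x => (start + x) + j * length))).length
      = length.toNat := by
    rw [List.length_map, PySem.List.length_pyRange_one]; omega
  rw [if_neg (by rw [hlen]; omega)]
  rw [get_xor_eq, hlen]
  simp only []
  rw [show ((length.toNat : Nat) : Int) = 0 + (length.toNat : Int) from by ring]
  rw [pairfold _ length.toNat 0 []]
  simp only []
  rw [foldl_concat_xor]
  rw [show xorList [] = 0 from rfl]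
  rw [show (0 : Int) + ((length.toNat : Nat) : Int) = length from by omega]
  apply PySem.List.foldl_congr_mem
  intro ans n hn
  obtain ⟨hn0, hnL⟩ := PySem.List.mem_pyRange_one.mp hn
  congr 1
  rw [PySem.List.pyGetD_map_pyRange_of_nonneg _ _ _ _ hn0 hnL]
  rw [List.length_map, PySem.List.length_pyRange_one]
  rw [show (((length - 0).toNat : Nat) : Int) - n = (((length - n).toNat : Nat) : Int) from by omega]
  rw [PySem.List.slice_to_natCast]
  rw [← List.map_take, take_pyRange_zero length ((length - n).toNat) (by omega)]
  rw [show (((length - n).toNat : Nat) : Int) = length - n from by omega]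
  rw [rangeXor_correct]
  congr 1
  rw [PySem.List.pyRange_one 0 (length - n), PySem.List.pyRange_one (start + n * length),
    List.map_map]
  rw [show (length - n - 0).toNat = (start + n * length + length - n - (start + n * length)).toNat
    from by omega]
  apply List.map_congr_left
  intro k _
  simp only [Function.comp]
  ring
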